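-- pv_equiv track=rewrite | github.com/Rivejjj/distribuidos-tp1 | decades_accumulator/common/accumulator.py | __get_year_regex
-- ===== SOURCE A (Python) =====
-- def __get_year_regex(year):
--     text = str(year)
--     if text == "":
--         return None
--     i = 0
--     while i < len(text):
--         if text[i].isdigit():
--             digits = ""
--             while i < len(text) and text[i].isdigit() and len(digits) < 4:
--                 digits += text[i]
--                 i += 1
--             if len(digits) == 4:
--                 return int(digits)
--         else:
--             i += 1
--     return None
-- ===== SOURCE B (Python) =====
-- def __get_year_regex(year):
--     text = str(year)
--     # pass 1: collect all maximal digit runs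
--     runs = []
--     cur = ""
--     for ch in text:
--         if ch.isdigit():
--             cur += ch
--         else:
--             if cur:
--                 runs.append(cur)
--             cur = ""
--     if cur:
--         runs.append(cur)
--     # pass 2: first run with at least 4 digits -> int of its first 4
--     for run in runs:
--         if len(run) >= 4:
--             return int(run[:4])
--     return None
-- ===== Notes on version B (the rewrite author's own statement) =====
-- stated objective: alternative
-- what changed: B replaces A's nested index-based while loops (which collect at most 4 digits and return mid-scan) by two separate passes: one pass collecting all maximal digit runs into a list, then a pass returning int(run[:4]) for the first run of length >= 4.
import Mathlib
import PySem

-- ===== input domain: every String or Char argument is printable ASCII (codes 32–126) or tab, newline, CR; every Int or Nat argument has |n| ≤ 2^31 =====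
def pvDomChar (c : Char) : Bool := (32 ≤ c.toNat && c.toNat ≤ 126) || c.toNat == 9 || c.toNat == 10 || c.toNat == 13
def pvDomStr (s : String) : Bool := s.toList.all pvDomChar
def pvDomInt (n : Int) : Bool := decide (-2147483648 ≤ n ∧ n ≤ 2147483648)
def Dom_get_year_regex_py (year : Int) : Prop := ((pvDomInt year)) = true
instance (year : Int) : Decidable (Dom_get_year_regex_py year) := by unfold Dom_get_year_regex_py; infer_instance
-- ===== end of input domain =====

-- B is an alternative two-pass decomposition (collect all maximal digit runs, then pick the
-- first run of length ≥ 4); equal return value to A on every input (both are total).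

-- Python's c.isdigit() for a single char, exact on the ASCII domain.
def pvIsDig (c : Char) : Bool := '0' ≤ c && c ≤ '9'

-- ===== PORT A =====
-- inner while loop of A: `while i < len(text) and text[i].isdigit() and len(digits) < 4`,
-- state = (collected digits, remaining characters from position i)
def pvDigitsA : List Char → List Char → List Char × List Char
  | [], ds => (ds, [])
  | c :: rest, ds =>
    if pvIsDig c && ds.length < 4 then pvDigitsA rest (ds ++ [c]) else (ds, c :: rest)

theorem pvDigitsA_len (cs ds : List Char) : (pvDigitsA cs ds).2.length ≤ cs.length := by
  induction cs generalizing ds with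
  | nil => simp [pvDigitsA]
  | cons c rest ih =>
    simp only [pvDigitsA]
    split
    · exact le_trans (ih _) (by simp)
    · simp

-- outer while loop of A over the remaining characters
def pvOuterA (cs : List Char) : Option Int :=
  match cs with
  | [] => none
  | c :: rest =>
    if pvIsDig c then
      -- inner loop, entered with digits = "" and text[i] = c a digit: its first
      -- iteration necessarily appends c, so we start it with accumulator [c]
      let p := pvDigitsA rest [c]
      if p.1.length = 4 then some ((PySem.Int.ofChars? p.1).getD 0)  -- int(digits); never None: digits = 4 digit chars
      else pvOuterA p.2
    else pvOuterA rest
termination_by cs.length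
decreasing_by
  · have := pvDigitsA_len rest [c]; simp; omega
  · simp

def get_year_regex_py (year : Int) : Option Int :=
  let text := PySem.Int.toChars year      -- text = str(year), as its character list
  if text = [] then none                   -- if text == "": return None
  else pvOuterA text

-- ===== PORT B =====
-- pass 1 of B: fold over the characters, state = (runs collected so far, current run)
def pvRunsB : List Char → List (List Char) → List Char → List (List Char)
  | [], runs, cur => if cur = [] then runs else runs ++ [cur]   -- trailing `if cur: runs.append(cur)`
  | c :: rest, runs, cur =>
    if pvIsDig c then pvRunsB rest runs (cur ++ [c])
    else pvRunsB rest (if cur = [] then runs else runs ++ [cur]) []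

-- pass 2 of B: first run of length ≥ 4 → int(run[:4])
def pvFindB : List (List Char) → Option Int
  | [] => none
  | r :: rs =>
    if 4 ≤ r.length then some ((PySem.Int.ofChars? (r.take 4)).getD 0)  -- int(run[:4]); never None here
    else pvFindB rs

def get_year_regex_py_alt (year : Int) : Option Int :=
  pvFindB (pvRunsB (PySem.Int.toChars year) [] [])

-- ===== PRECONDITION & SPEC =====
def Spec_get_year_regex_py (year : Int) (out : Option Int) : Prop := out = get_year_regex_py_alt year
instance (year : Int) (out : Option Int) : Decidable (Spec_get_year_regex_py year out) := by unfold Spec_get_year_regex_py; infer_instance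

-- ===== CLAIM (what is proved, stated in full; the proofs are below) =====
def Claim_equal_get_year_regex_py : Prop := ∀ (year : Int), Dom_get_year_regex_py year → Spec_get_year_regex_py year (get_year_regex_py year)

-- ===== LEMMAS AND PROOFS =====

-- accumulator lemma: runs already collected just prefix the result
theorem pvRunsB_acc (cs : List Char) (runs : List (List Char)) (cur : List Char) :
    pvRunsB cs runs cur = runs ++ pvRunsB cs [] cur := by
  induction cs generalizing runs cur with
  | nil => simp only [pvRunsB]; split <;> simp
  | cons c rest ih =>
    simp only [pvRunsB]
    split
    · exact ih _ _
    · rw [ih _ [], ih (if cur = [] then [] else [] ++ [cur]) []]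
      split <;> simp

-- the inner A-loop on a string decomposed by its maximal digit prefix
theorem pvDigitsA_eq (cs ds : List Char) (h : ds.length ≤ 4) :
    pvDigitsA cs ds =
      (ds ++ (cs.takeWhile pvIsDig).take (4 - ds.length),
       (cs.takeWhile pvIsDig).drop (4 - ds.length) ++ cs.dropWhile pvIsDig) := by
  induction cs generalizing ds with
  | nil => simp [pvDigitsA]
  | cons c rest ih =>
    simp only [pvDigitsA]
    by_cases hc : pvIsDig c = true
    · simp only [List.takeWhile_cons, List.dropWhile_cons, hc, if_pos]
      by_cases hd : ds.length < 4
      · rw [if_pos (by simp [hd])]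
        rw [ih (ds ++ [c]) (by simp; omega)]
        have h4 : 4 - ds.length = (4 - (ds ++ [c]).length) + 1 := by simp; omega
        rw [h4]
        simp [List.take_succ_cons, List.drop_succ_cons]
      · rw [if_neg (by simp [hd])]
        have : ds.length = 4 := by omega
        simp [this]
    · rw [if_neg (by simp [hc])]
      simp [List.dropWhile_cons, hc]

-- pass 1 of B absorbs a digit prefix into the current run
theorem pvRunsB_digits (ds : List Char) (hds : ∀ c ∈ ds, pvIsDig c = true) :
    ∀ (rest : List Char) (runs : List (List Char)) (cur : List Char),
      pvRunsB (ds ++ rest) runs cur = pvRunsB rest runs (cur ++ ds) := by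
  induction ds with
  | nil => simp
  | cons c ds' ih =>
    intro rest runs cur
    have hc : pvIsDig c = true := hds c (by simp)
    simp only [List.cons_append, pvRunsB, hc, if_pos]
    rw [ih (fun d hd => hds d (by simp [hd])) rest runs (cur ++ [c])]
    simp

-- main lemma: A's scan equals B's run-list scan, by strong induction on the length
theorem pvMain : ∀ (n : Nat) (cs : List Char), cs.length ≤ n →
    pvOuterA cs = pvFindB (pvRunsB cs [] []) := by
  intro n
  induction n with
  | zero =>
    intro cs h
    have : cs = [] := List.eq_nil_of_length_eq_zero (by omega)
    simp [this, pvOuterA, pvRunsB, pvFindB]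
  | succ n ih =>
    intro cs hlen
    match cs with
    | [] => simp [pvOuterA, pvRunsB, pvFindB]
    | c :: rest =>
      by_cases hc : pvIsDig c = true
      · -- digit case: c :: rest = (c :: takeWhile) ++ dropWhile, its maximal digit run first
        have hds : ∀ d ∈ c :: rest.takeWhile pvIsDig, pvIsDig d = true := by
          intro d hd
          rcases List.mem_cons.1 hd with h | h
          · exact h ▸ hc
          · exact List.mem_takeWhile_imp h
        -- A side: run the inner loop over the digit prefix
        have hA : pvOuterA (c :: rest) =
            (if ([c] ++ (rest.takeWhile pvIsDig).take 3).length = 4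
             then some ((PySem.Int.ofChars? ([c] ++ (rest.takeWhile pvIsDig).take 3)).getD 0)
             else pvOuterA ((rest.takeWhile pvIsDig).drop 3 ++ rest.dropWhile pvIsDig)) := by
          rw [pvOuterA]
          simp only [hc, if_pos]
          rw [pvDigitsA_eq rest [c] (by simp)]
          norm_num
        -- B side: pass 1 absorbs the whole digit run into cur
        have hB : pvRunsB (c :: rest) [] [] =
            pvRunsB (rest.dropWhile pvIsDig) [] (c :: rest.takeWhile pvIsDig) := by
          conv_lhs => rw [show c :: rest
              = (c :: rest.takeWhile pvIsDig) ++ rest.dropWhile pvIsDig by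
            conv_lhs => rw [← List.takeWhile_append_dropWhile (p := pvIsDig) (l := c :: rest)]
            simp [List.dropWhile_cons, hc]]
          rw [pvRunsB_digits (c :: rest.takeWhile pvIsDig) hds _ [] []]
          simp
        -- pass 1 then flushes that run at once: dropWhile is [] or non-digit-headed
        have hBflush : pvRunsB (rest.dropWhile pvIsDig) [] (c :: rest.takeWhile pvIsDig)
            = (c :: rest.takeWhile pvIsDig) :: pvRunsB ((rest.dropWhile pvIsDig).drop 1) [] [] := by
          match hdw : rest.dropWhile pvIsDig with
          | [] => simp [pvRunsB]
          | r :: rs' =>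
            have hr : pvIsDig r = false := by
              have h1 := List.head?_dropWhile_not pvIsDig rest
              rw [hdw] at h1; simpa using h1
            simp only [pvRunsB, hr, Bool.false_eq_true, if_false,
              List.cons_ne_nil, List.nil_append]
            rw [pvRunsB_acc]
            simp
        rw [hA, hB, hBflush]
        by_cases h4 : 3 ≤ (rest.takeWhile pvIsDig).length
        · -- long run: both return int of its first 4 digits
          rw [if_pos (by simp; omega)]
          have : (4 : Nat) ≤ (c :: rest.takeWhile pvIsDig).length := by simp; omega
          simp only [pvFindB, if_pos this]
          have : (c :: rest.takeWhile pvIsDig).take 4 = [c] ++ (rest.takeWhile pvIsDig).take 3 := by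
            simp [List.take_succ_cons]
          rw [this]
        · -- short run: A skips past it, B records a run pvFindB ignores
          rw [if_neg (by simp; omega)]
          have hdrop : (rest.takeWhile pvIsDig).drop 3 = [] :=
            List.drop_eq_nil_of_le (by omega)
          rw [hdrop, List.nil_append]
          have hshort : ¬ (4 : Nat) ≤ (c :: rest.takeWhile pvIsDig).length := by simp; omega
          simp only [pvFindB, if_neg hshort]
          -- A continues at dropWhile; it is [] or non-digit-headed, so one A-step aligns
          match hdw : rest.dropWhile pvIsDig with
          | [] => simp [pvOuterA, pvRunsB, pvFindB]
          | r :: rs' =>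
            have hr : pvIsDig r = false := by
              have h1 := List.head?_dropWhile_not pvIsDig rest
              rw [hdw] at h1; simpa using h1
            rw [pvOuterA]
            simp only [hr, Bool.false_eq_true, if_false, List.drop_succ_cons, List.drop_zero]
            apply ih
            have h1 : (rest.dropWhile pvIsDig).length ≤ rest.length :=
              List.length_dropWhile_le _ _
            rw [hdw] at h1
            simp at h1 hlen; omega
      · -- non-digit head: both sides just skip it
        rw [pvOuterA]
        rw [if_neg hc]
        rw [show pvRunsB (c :: rest) [] [] = pvRunsB rest [] [] by
          simp [pvRunsB, hc]]
        exact ih rest (by simp at hlen; omega)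

-- ===== VERDICT (by name: the statement is the Claim_ definition above) =====
theorem get_year_regex_py_spec : Claim_equal_get_year_regex_py := by
  intro year _
  unfold Spec_get_year_regex_py get_year_regex_py get_year_regex_py_alt
  by_cases h : PySem.Int.toChars year = []
  · simp [h, pvRunsB, pvFindB]
  · simp only [h, if_false]
    exact pvMain _ _ (le_refl _)
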